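-- pv_equiv track=rewrite | github.com/adamhockenberry/OpenBiology_2016 | Code/trans_eff_library.py | get_occupancy
-- ===== SOURCE A (Python) =====
-- def get_occupancy(start, stop, occupancyDict, reverse=False):
--     listy = []
--     for position in range(start, stop):
--         try:
--             listy.append(occupancyDict[position])
--         except KeyError:
--             listy.append(0)
--     if reverse:
--         listy = listy[::-1]
--     return listy
-- ===== SOURCE B (Python) =====
-- def get_occupancy(start, stop, occupancyDict, reverse=False):
--     listy = [0] * (stop - start)
--     for position, value in occupancyDict.items():
--         if start <= position < stop:
--             listy[position - start] = value
--     return listy[::-1] if reverse else listy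
-- ===== Notes on version B (the rewrite author's own statement) =====
-- stated objective: alternative
-- what changed: B pre-allocates a zeroed dense list of length stop-start and scatters the dict's (position,value) items into it, instead of probing the dict at every position of the range.
import Mathlib
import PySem

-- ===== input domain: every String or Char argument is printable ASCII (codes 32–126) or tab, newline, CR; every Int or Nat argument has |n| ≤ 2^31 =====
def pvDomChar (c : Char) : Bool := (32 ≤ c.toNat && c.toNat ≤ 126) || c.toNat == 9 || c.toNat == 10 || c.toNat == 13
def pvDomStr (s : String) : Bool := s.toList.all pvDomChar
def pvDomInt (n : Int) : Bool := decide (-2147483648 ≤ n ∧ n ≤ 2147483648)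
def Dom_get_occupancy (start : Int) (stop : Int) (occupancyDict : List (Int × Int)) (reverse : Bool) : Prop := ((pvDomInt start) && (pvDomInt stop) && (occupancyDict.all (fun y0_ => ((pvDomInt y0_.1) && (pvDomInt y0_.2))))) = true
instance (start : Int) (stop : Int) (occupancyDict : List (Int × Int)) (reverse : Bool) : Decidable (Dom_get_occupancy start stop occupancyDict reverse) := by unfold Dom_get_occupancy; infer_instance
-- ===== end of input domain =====

-- B pre-zeroes a dense list of length stop-start and scatters the dict items into it,
-- instead of probing the dict at each position of the range; same return value on Pre_.

-- ===== PORT A =====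
def get_occupancy (start : Int) (stop : Int) (occupancyDict : List (Int × Int)) (reverse : Bool) : List Int :=
  let listy := (PySem.List.pyRange start stop 1).foldl
    (fun acc position => acc ++ [(PySem.Dict.mk occupancyDict).getD position 0]) []
  if reverse then listy.reverse else listy

-- ===== PORT B =====
-- the scatter loop of Source B: for position, value in items: if start <= position < stop: listy[position-start] = value
def pvScatter (start : Int) (stop : Int) (d : List (Int × Int)) (init : List Int) : List Int :=
  d.foldl (fun res kv =>
    if start ≤ kv.1 ∧ kv.1 < stop then res.set (kv.1 - start).toNat kv.2 else res) init

def get_occupancy_alt (start : Int) (stop : Int) (occupancyDict : List (Int × Int)) (reverse : Bool) : List Int :=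
  let listy := pvScatter start stop occupancyDict (List.replicate (stop - start).toNat 0)
  if reverse then listy.reverse else listy

-- ===== PRECONDITION & SPEC =====
-- Pre_ excludes association lists with duplicate keys, which cannot arise from a Python dict
-- argument; on them A's first-match lookup vs B's last-write overwrite is an accident of the
-- assoc-list representation, not of either Python program.
def Pre_get_occupancy (start : Int) (stop : Int) (occupancyDict : List (Int × Int)) (reverse : Bool) : Prop :=
  (occupancyDict.map Prod.fst).Nodup
instance (start : Int) (stop : Int) (occupancyDict : List (Int × Int)) (reverse : Bool) : Decidable (Pre_get_occupancy start stop occupancyDict reverse) := by unfold Pre_get_occupancy; infer_instance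

def pvWitness_get_occupancy : Int × Int × (List (Int × Int)) × Bool := (0, 2, [(0, 5)], false)

def Spec_get_occupancy (start : Int) (stop : Int) (occupancyDict : List (Int × Int)) (reverse : Bool) (out : List Int) : Prop := out = get_occupancy_alt start stop occupancyDict reverse
instance (start : Int) (stop : Int) (occupancyDict : List (Int × Int)) (reverse : Bool) (out : List Int) : Decidable (Spec_get_occupancy start stop occupancyDict reverse out) := by unfold Spec_get_occupancy; infer_instance

-- ===== CLAIM (what is proved, stated in full; the proofs are below) =====
def Claim_equal_get_occupancy : Prop := ∀ (start : Int) (stop : Int) (occupancyDict : List (Int × Int)) (reverse : Bool), Dom_get_occupancy start stop occupancyDict reverse → Pre_get_occupancy start stop occupancyDict reverse → Spec_get_occupancy start stop occupancyDict reverse (get_occupancy start stop occupancyDict reverse)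

-- ===== LEMMAS AND PROOFS =====

theorem pv_foldl_append_map {α β : Type} (f : α → β) :
    ∀ (l : List α) (acc : List β),
      l.foldl (fun a x => a ++ [f x]) acc = acc ++ l.map f
  | [], acc => by simp
  | x :: l, acc => by
      simp [List.foldl_cons, pv_foldl_append_map f l]

theorem pvScatter_nil (start stop : Int) (init : List Int) :
    pvScatter start stop [] init = init := rfl

theorem pvScatter_cons (start stop : Int) (kv : Int × Int) (rest : List (Int × Int))
    (init : List Int) :
    pvScatter start stop (kv :: rest) init =
      pvScatter start stop rest
        (if start ≤ kv.1 ∧ kv.1 < stop then init.set (kv.1 - start).toNat kv.2 else init) := rfl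

theorem pvScatter_length (start stop : Int) :
    ∀ (d : List (Int × Int)) (init : List Int),
      (pvScatter start stop d init).length = init.length
  | [], init => rfl
  | kv :: rest, init => by
      rw [pvScatter_cons]
      rw [pvScatter_length start stop rest]
      split <;> simp

theorem pvScatter_getElem? (start stop : Int) :
    ∀ (d : List (Int × Int)) (init : List Int),
      (d.map Prod.fst).Nodup → init.length = (stop - start).toNat →
      ∀ i : Nat, i < init.length →
      (pvScatter start stop d init)[i]? =
        ((PySem.Dict.mk d).get? (start + (i : Int))).or init[i]? := by
  intro d
  induction d with
  | nil =>
      intro init _ _ i hi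
      simp [pvScatter_nil, PySem.Dict.get?]
  | cons kv rest ih =>
      intro init hnd hlen i hi
      obtain ⟨k, v⟩ := kv
      have hcn := List.nodup_cons.mp (show (k :: rest.map Prod.fst).Nodup by simpa using hnd)
      have hnd' : (rest.map Prod.fst).Nodup := hcn.2
      have hknot : k ∉ rest.map Prod.fst := hcn.1
      rw [pvScatter_cons]
      by_cases hk : k = start + (i : Int)
      · -- this key writes exactly index i; rest has no key start+i
        have hrange : start ≤ k ∧ k < stop := by
          constructor
          · omega
          · omega
        have hidx : (k - start).toNat = i := by omega
        rw [if_pos hrange, hidx]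
        have hlen' : (init.set i v).length = (stop - start).toNat := by
          simpa using hlen
        rw [ih (init.set i v) hnd' hlen' i (by simpa using hi)]
        have hrest : (PySem.Dict.mk rest).get? (start + (i : Int)) = none := by
          rw [PySem.Dict.get?_eq_none_iff_not_mem_keys]
          simpa [PySem.Dict.keys, hk] using hknot
        have hcons : (PySem.Dict.mk ((k, v) :: rest)).get? (start + (i : Int)) = some v := by
          rw [PySem.Dict.get?_mk_cons]
          simp [hk]
        rw [hrest, hcons]
        simp [hi]
      · -- this key does not touch index i
        have hstep : (if start ≤ k ∧ k < stop then init.set (k - start).toNat v else init)[i]? = init[i]? := by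
          split
          · next h =>
              have : (k - start).toNat ≠ i := by omega
              simp [List.getElem?_set_ne this]
          · rfl
        have hlen' : (if start ≤ k ∧ k < stop then init.set (k - start).toNat v else init).length = (stop - start).toNat := by
          split <;> simpa using hlen
        rw [ih _ hnd' hlen' i (by rw [hlen']; omega)]
        rw [hstep]
        have hcons : (PySem.Dict.mk ((k, v) :: rest)).get? (start + (i : Int)) =
            (PySem.Dict.mk rest).get? (start + (i : Int)) := by
          rw [PySem.Dict.get?_mk_cons]
          simp [hk]
        rw [hcons]

theorem pv_core (start stop : Int) (d : List (Int × Int))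
    (hnd : (d.map Prod.fst).Nodup) :
    (PySem.List.pyRange start stop 1).foldl
        (fun acc position => acc ++ [(PySem.Dict.mk d).getD position 0]) []
      = pvScatter start stop d (List.replicate (stop - start).toNat 0) := by
  rw [pv_foldl_append_map]
  apply List.ext_getElem?
  intro i
  have hlenA : ((PySem.List.pyRange start stop 1).map
      (fun position => (PySem.Dict.mk d).getD position 0)).length = (stop - start).toNat := by
    simp [PySem.List.length_pyRange_one]
  have hlenB : (pvScatter start stop d (List.replicate (stop - start).toNat 0)).length
      = (stop - start).toNat := by
    simp [pvScatter_length]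
  by_cases hi : i < (stop - start).toNat
  · have hA : ((PySem.List.pyRange start stop 1).map
        (fun position => (PySem.Dict.mk d).getD position 0))[i]? =
        some ((PySem.Dict.mk d).getD (start + (i : Int)) 0) := by
      rw [List.getElem?_eq_getElem (by omega)]
      simp [PySem.List.getElem_pyRange_one]
    have hB := pvScatter_getElem? start stop d (List.replicate (stop - start).toNat 0)
      hnd (by simp) i (by simpa using hi)
    rw [List.nil_append, hA, hB]
    rw [PySem.Dict.getD_eq_get?_getD]
    cases hg : (PySem.Dict.mk d).get? (start + (i : Int)) with
    | none => simp [Option.or, hi]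
    | some v => simp [Option.or]
  · rw [List.nil_append]
    rw [List.getElem?_eq_none (by omega), List.getElem?_eq_none (by omega)]

-- ===== VERDICT (by name: the statement is the Claim_ definition above) =====
theorem get_occupancy_spec : Claim_equal_get_occupancy := by
  intro start stop d rev _hdom hpre
  unfold Spec_get_occupancy get_occupancy get_occupancy_alt
  have h := pv_core start stop d hpre
  simp only [h]
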